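-- pv_equiv track=rewrite | github.com/Rudra2018/ARTEMIS | adaptive_learning_engine.py | _check_numeric_pattern
-- ===== SOURCE A (Python) =====
-- def _check_numeric_pattern(text: str) -> bool:
--     """Check for suspicious numeric patterns"""
--     numbers = []
--     current_num = ""
--
--     for char in text:
--         if char.isdigit():
--             current_num += char
--         else:
--             if current_num:
--                 numbers.append(int(current_num))
--                 current_num = ""
--
--     if current_num:
--         numbers.append(int(current_num))
--
--     # Check if numbers could represent encoded text (ASCII codes)
--     if len(numbers) >= 3:
--         ascii_chars = [num for num in numbers if 32 <= num <= 126]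
--         return len(ascii_chars) == len(numbers)
--
--     return False
-- ===== SOURCE B (Python) =====
-- def _check_numeric_pattern(text: str) -> bool:
--     numbers = []
--     i, n = 0, len(text)
--     while i < n:
--         if text[i].isdigit():
--             j = i
--             while j < n and text[j].isdigit():
--                 j += 1
--             numbers.append(int(text[i:j]))
--             i = j
--         else:
--             i += 1
--     return len(numbers) >= 3 and all(32 <= m <= 126 for m in numbers)
-- ===== Notes on version B (the rewrite author's own statement) =====
-- stated objective: idiomatic
-- what changed: Replaces the per-character accumulator with both flush branches by a two-pointer run scanner that slices each maximal digit run and converts it at once, and folds the final guard and range test into a single boolean expression.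
import Mathlib
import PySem

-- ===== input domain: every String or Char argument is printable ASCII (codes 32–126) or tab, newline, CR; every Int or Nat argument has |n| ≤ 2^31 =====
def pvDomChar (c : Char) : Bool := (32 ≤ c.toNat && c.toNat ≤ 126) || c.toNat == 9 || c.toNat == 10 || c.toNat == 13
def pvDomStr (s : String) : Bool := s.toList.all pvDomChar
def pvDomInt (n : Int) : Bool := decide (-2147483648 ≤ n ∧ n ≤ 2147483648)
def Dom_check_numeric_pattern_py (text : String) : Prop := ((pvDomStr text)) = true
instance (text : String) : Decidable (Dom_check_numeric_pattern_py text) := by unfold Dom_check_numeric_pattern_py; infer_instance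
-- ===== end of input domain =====

-- B replaces A's per-character accumulator (with its two flush branches) by a run scanner
-- that takes each maximal digit run at once; same O(n) cost, plainer shape.
-- Char.isDigit and the digit-fold pvParseInt are exact for Python's isdigit/int() on the
-- ASCII domain Dom_ restricts to.

-- ===== PORT A =====
-- int(digits) for a nonempty ASCII digit string, ported by hand (exact there)
def pvParseInt (cs : List Char) : Int :=
  cs.foldl (fun n c => 10 * n + ((c.toNat : Int) - 48)) 0

-- one loop iteration of A: state = (numbers, current_num)
def pvStepA (s : List Int × List Char) (c : Char) : List Int × List Char :=
  if c.isDigit then (s.1, s.2 ++ [c])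
  else if s.2 = [] then (s.1, []) else (s.1 ++ [pvParseInt s.2], [])

def check_numeric_pattern_py (text : String) : Bool :=
  let s := text.toList.foldl pvStepA ([], [])
  let numbers := if s.2 = [] then s.1 else s.1 ++ [pvParseInt s.2]
  if 3 ≤ numbers.length then
    ((numbers.filter (fun n => decide (32 ≤ n) && decide (n ≤ 126))).length == numbers.length)
  else false

-- ===== PORT B =====
-- the maximal digit runs of the text, scanned run by run (Source B's while/while index scan)
def pvDigitRuns : List Char → List (List Char)
  | [] => []
  | c :: cs =>
    if c.isDigit then
      (c :: cs.takeWhile Char.isDigit) :: pvDigitRuns (cs.dropWhile Char.isDigit)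
    else pvDigitRuns cs
termination_by l => l.length
decreasing_by
  · have := List.length_dropWhile_le (p := Char.isDigit) (l := cs); simp; omega
  · simp

def check_numeric_pattern_py_alt (text : String) : Bool :=
  let numbers := (pvDigitRuns text.toList).map pvParseInt
  decide (3 ≤ numbers.length) && numbers.all (fun n => decide (32 ≤ n) && decide (n ≤ 126))

-- ===== PRECONDITION & SPEC =====
def Spec_check_numeric_pattern_py (text : String) (out : Bool) : Prop := out = check_numeric_pattern_py_alt text
instance (text : String) (out : Bool) : Decidable (Spec_check_numeric_pattern_py text out) := by unfold Spec_check_numeric_pattern_py; infer_instance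

-- ===== CLAIM (what is proved, stated in full; the proofs are below) =====
def Claim_equal_check_numeric_pattern_py : Prop := ∀ (text : String), Dom_check_numeric_pattern_py text → Spec_check_numeric_pattern_py text (check_numeric_pattern_py text)

-- ===== LEMMAS AND PROOFS =====

-- proof helper: A's accumulator recursion expressed as a run list with pending run `cur`
def pvRuns' (cur : List Char) : List Char → List (List Char)
  | [] => if cur = [] then [] else [cur]
  | c :: cs =>
    if c.isDigit then pvRuns' (cur ++ [c]) cs
    else if cur = [] then pvRuns' [] cs else cur :: pvRuns' [] cs

-- A's fold + final flush = numbers of the pending-run recursion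
lemma pv_flush_foldl : ∀ (cs cur : List Char) (nums : List Int),
    (let s := List.foldl pvStepA (nums, cur) cs
     if s.2 = [] then s.1 else s.1 ++ [pvParseInt s.2])
      = nums ++ (pvRuns' cur cs).map pvParseInt := by
  intro cs
  induction cs with
  | nil =>
    intro cur nums
    by_cases h : cur = [] <;> simp [pvRuns', h]
  | cons c cs ih =>
    intro cur nums
    by_cases hd : c.isDigit
    · simpa [pvRuns', pvStepA, hd] using ih (cur ++ [c]) nums
    · by_cases hc : cur = []
      · simpa [pvRuns', pvStepA, hd, hc] using ih [] nums
      · simpa [pvRuns', pvStepA, hd, hc] using ih [] (nums ++ [pvParseInt cur])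

-- the pending-run recursion computes B's takeWhile/dropWhile runs
lemma pv_runs'_eq : ∀ (cs : List Char),
    (∀ cur : List Char, cur ≠ [] →
      pvRuns' cur cs
        = (cur ++ cs.takeWhile Char.isDigit) :: pvDigitRuns (cs.dropWhile Char.isDigit))
    ∧ pvRuns' [] cs = pvDigitRuns cs := by
  intro cs
  induction cs with
  | nil =>
    refine ⟨fun cur hc => ?_, by simp [pvRuns', pvDigitRuns]⟩
    simp [pvRuns', hc, pvDigitRuns]
  | cons c cs ih =>
    constructor
    · intro cur hc
      by_cases hd : c.isDigit
      · have := ih.1 (cur ++ [c]) (by simp)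
        simp [pvRuns', hd, this]
      · simp [pvRuns', hd, hc, ih.2,
          pvDigitRuns]
    · by_cases hd : c.isDigit
      · have := ih.1 [c] (by simp)
        simp only [pvRuns', hd, if_pos, List.nil_append] at this ⊢
        simp [this, pvDigitRuns, hd]
      · simp [pvRuns', hd, ih.2, pvDigitRuns]

-- length-of-filter equality test is `all`
lemma pv_filter_len_all (p : Int → Bool) : ∀ (l : List Int),
    (((l.filter p).length == l.length) : Bool) = l.all p := by
  intro l
  induction l with
  | nil => rfl
  | cons a l ih =>
    by_cases h : p a = true
    · simpa [List.filter_cons, h, List.all_cons] using ih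
    · have hle := List.length_filter_le p l
      simp [h, List.all_cons]
      omega

-- ===== VERDICT (by name: the statement is the Claim_ definition above) =====
theorem check_numeric_pattern_py_spec : Claim_equal_check_numeric_pattern_py := by
  intro text _
  unfold Spec_check_numeric_pattern_py check_numeric_pattern_py check_numeric_pattern_py_alt
  have h1 := pv_flush_foldl text.toList [] []
  have h2 := (pv_runs'_eq text.toList).2
  simp only [h2] at h1
  simp only [h1, List.nil_append]
  set N := (pvDigitRuns text.toList).map pvParseInt with hN
  by_cases h : 3 ≤ N.length
  · simp [h, pv_filter_len_all]
  · simp [h]
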